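-- pv_equiv track=rewrite | github.com/MrBrantCode/unitest_baseline | mut_generate/mist_train_taco/taco_17412/solution.py | convert_to_goat_latin
-- ===== SOURCE A (Python) =====
-- def convert_to_goat_latin(S: str) -> str:
--     result = ''
--     vowels = {'a', 'e', 'i', 'o', 'u', 'A', 'E', 'I', 'O', 'U'}
--     a_append = 'a'
--     new_word = ''
--     ma_append = ''
--     last_char = ''
--
--     for char in S:
--         last_char = char
--         full_append = ma_append + a_append
--
--         if char == ' ':
--             result += new_word + full_append + ' '
--             a_append += 'a'
--             new_word = ''
--             ma_append = ''
--             continue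
--
--         if ma_append == '' and char in vowels:
--             ma_append = 'ma'
--             new_word += char
--             continue
--
--         if ma_append == '' and char not in vowels:
--             ma_append = char + 'ma'
--             continue
--
--         new_word += char
--
--     if last_char != ' ':
--         result += new_word + ma_append + a_append
--
--     return result
-- ===== SOURCE B (Python) =====
-- def convert_to_goat_latin(S: str) -> str:
--     vowels = set('aeiouAEIOU')
--     pieces = []
--     for i, w in enumerate(S.split(' ')):
--         if w[0] not in vowels:
--             w = w[1:] + w[0]
--         pieces.append(w + 'ma' + 'a' * (i + 1))
--     return ' '.join(pieces)
-- ===== Notes on version B (the rewrite author's own statement) =====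
-- stated objective: idiomatic
-- what changed: replaced A's single-pass five-variable character state machine with the idiomatic decomposition split-on-space, map each word (by index) to its Goat-Latin form, join with spaces; Pre_ excludes strings with an empty word between separators (empty S, leading/trailing or consecutive spaces), where B's w[0] raises IndexError while A still returns a value (see cites)
-- outside the precondition, e.g. on convert_to_goat_latin(''): A returns 'a', B raises IndexError; on convert_to_goat_latin(' '): A returns 'a ', B raises IndexError; on convert_to_goat_latin('hi '): A returns 'ihmaa ', B raises IndexError
import Mathlib
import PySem

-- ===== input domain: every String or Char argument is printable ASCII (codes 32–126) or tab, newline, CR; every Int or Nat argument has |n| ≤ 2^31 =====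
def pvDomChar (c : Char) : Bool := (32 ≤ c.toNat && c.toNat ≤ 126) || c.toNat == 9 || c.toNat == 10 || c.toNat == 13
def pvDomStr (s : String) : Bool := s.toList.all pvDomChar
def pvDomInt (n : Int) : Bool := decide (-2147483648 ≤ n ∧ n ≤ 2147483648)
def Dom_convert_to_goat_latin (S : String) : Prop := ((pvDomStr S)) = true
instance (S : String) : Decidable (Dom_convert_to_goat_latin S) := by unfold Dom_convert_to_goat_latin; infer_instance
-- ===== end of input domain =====

-- B replaces A's character-by-character state machine by the idiomatic split-on-space / map-each-word / join
-- decomposition; Pre_ excludes strings containing an empty word (empty S, leading/trailing/consecutive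
-- spaces), where B raises IndexError on w[0] while A still returns a value.


-- ===== PORT A =====
def pvVowels : List Char := ['a', 'e', 'i', 'o', 'u', 'A', 'E', 'I', 'O', 'U']

-- loop body of A: state = (result, a_append, new_word, ma_append, last_char); last_char '' ↦ none
def pvStepA (st : List Char × List Char × List Char × List Char × Option Char) (c : Char) :
    List Char × List Char × List Char × List Char × Option Char :=
  let result := st.1; let a_append := st.2.1; let new_word := st.2.2.1; let ma_append := st.2.2.2.1
  let full_append := ma_append ++ a_append
  if c = ' ' then
    (result ++ new_word ++ full_append ++ [' '], a_append ++ ['a'], [], [], some c)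
  else if ma_append = [] ∧ c ∈ pvVowels then
    (result, a_append, new_word ++ [c], ['m', 'a'], some c)
  else if ma_append = [] ∧ c ∉ pvVowels then
    (result, a_append, new_word, [c, 'm', 'a'], some c)
  else
    (result, a_append, new_word ++ [c], ma_append, some c)

def convert_to_goat_latin (S : String) : String :=
  let st := S.toList.foldl pvStepA ([], ['a'], [], [], none)
  String.ofList (if st.2.2.2.2 ≠ some ' ' then st.1 ++ st.2.2.1 ++ st.2.2.2.1 ++ st.2.1 else st.1)

-- ===== PORT B =====
def pvVowelsB : List Char := ['a', 'e', 'i', 'o', 'u', 'A', 'E', 'I', 'O', 'U']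

-- Source B's loop body for word w at index i: w[0] raises IndexError on an empty word (outside Pre_),
-- so the [] case is never reached on admitted inputs
def pvGoat (i : Nat) (w : List Char) : List Char :=
  (match w with
   | [] => []
   | c :: t => if c ∈ pvVowelsB then c :: t else t ++ [c]) ++ ['m', 'a'] ++ List.replicate (i + 1) 'a'

-- S.split(' ') is List.splitOn ' ' on the char list (exact for the single-char separator); ' '.join is intercalate
def convert_to_goat_latin_alt (S : String) : String :=
  String.ofList (List.intercalate [' ']
    (((S.toList.splitOn ' ').zipIdx).map (fun p => pvGoat p.2 p.1)))

-- ===== PRECONDITION & SPEC =====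
-- Pre_ excludes strings whose split on ' ' contains an empty word (empty S, leading/trailing or
-- consecutive spaces): there B raises IndexError on w[0], while A still returns a value
-- (examples in claim.json's cites).
def Pre_convert_to_goat_latin (S : String) : Prop := [] ∉ S.toList.splitOn ' '
instance (S : String) : Decidable (Pre_convert_to_goat_latin S) := by
  unfold Pre_convert_to_goat_latin; infer_instance

def pvWitness_convert_to_goat_latin : String := "I speak Goat"

def Spec_convert_to_goat_latin (S : String) (out : String) : Prop :=
  out = convert_to_goat_latin_alt S
instance (S : String) (out : String) : Decidable (Spec_convert_to_goat_latin S out) := by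
  unfold Spec_convert_to_goat_latin; infer_instance

-- ===== CLAIM (what is proved, stated in full; the proofs are below) =====
def Claim_equal_convert_to_goat_latin : Prop :=
  ∀ (S : String), Dom_convert_to_goat_latin S → Pre_convert_to_goat_latin S →
    Spec_convert_to_goat_latin S (convert_to_goat_latin S)

-- ===== LEMMAS AND PROOFS =====

-- finalize of A's final state (identical to the expression in the port)
def pvFinalize (st : List Char × List Char × List Char × List Char × Option Char) : List Char :=
  if st.2.2.2.2 ≠ some ' ' then st.1 ++ st.2.2.1 ++ st.2.2.2.1 ++ st.2.1 else st.1

-- new_word / ma_append after processing one space-free word from the fresh state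
def pvNW : List Char → List Char
  | [] => []
  | c :: t => if c ∈ pvVowels then c :: t else t
def pvMA : List Char → List Char
  | [] => []
  | c :: _ => if c ∈ pvVowels then ['m', 'a'] else [c, 'm', 'a']

def pvGoatCore (w : List Char) (as : List Char) : List Char :=
  match w with
  | [] => as
  | c :: t =>
    if c ∈ pvVowels then (c :: t) ++ ['m', 'a'] ++ as else t ++ [c] ++ ['m', 'a'] ++ as

-- B's pieces with an explicit growing a-suffix
def pvPieces (as : List Char) : List (List Char) → List (List Char)
  | [] => []
  | w :: t => pvGoatCore w as :: pvPieces (as ++ ['a']) t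

lemma pv_goat_core (i : Nat) (w : List Char) (hw : w ≠ []) :
    pvGoat i w = pvGoatCore w (List.replicate (i + 1) 'a') := by
  cases w with
  | nil => exact absurd rfl hw
  | cons c t =>
    simp only [pvGoat, pvGoatCore, pvVowelsB, pvVowels]
    split <;> simp

lemma pv_pieces_eq (wl : List (List Char)) (n : Nat) (hw : [] ∉ wl) :
    (wl.zipIdx n).map (fun p => pvGoat p.2 p.1) = pvPieces (List.replicate (n + 1) 'a') wl := by
  induction wl generalizing n with
  | nil => rfl
  | cons w t ih =>
    rw [List.zipIdx_cons, List.map_cons, ih _ (fun h => hw (List.mem_cons_of_mem _ h)),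
      pvPieces, pv_goat_core _ _ (fun h => hw (h ▸ List.mem_cons_self)), ← List.replicate_succ']

lemma pv_optlast (c : Char) (t : List Char) (l0 : Option Char) :
    (c :: t).getLast?.or l0 = t.getLast?.or (some c) := by
  cases h : t.getLast? with
  | none =>
    have ht : t = [] := List.getLast?_eq_none_iff.mp h
    subst ht; rfl
  | some x => simp [List.getLast?_cons, h]

-- once ma_append ≠ '', every non-space char is appended to new_word
lemma pv_run_tail (ws : List Char) (r as nw ma : List Char) (l0 : Option Char)
    (hma : ma ≠ []) (hws : ∀ c ∈ ws, c ≠ ' ') :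
    List.foldl pvStepA (r, as, nw, ma, l0) ws = (r, as, nw ++ ws, ma, ws.getLast?.or l0) := by
  induction ws generalizing nw l0 with
  | nil => simp
  | cons c t ih =>
    have hc : c ≠ ' ' := hws c (by simp)
    rw [List.foldl_cons]
    have hstep : pvStepA (r, as, nw, ma, l0) c = (r, as, nw ++ [c], ma, some c) := by
      simp [pvStepA, hc, hma]
    rw [hstep, ih (nw ++ [c]) (some c) (fun x hx => hws x (by simp [hx])), pv_optlast]
    simp

-- processing one space-free word from the fresh state
lemma pv_run_word (ws : List Char) (r as : List Char) (l0 : Option Char)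
    (hws : ∀ c ∈ ws, c ≠ ' ') :
    List.foldl pvStepA (r, as, [], [], l0) ws = (r, as, pvNW ws, pvMA ws, ws.getLast?.or l0) := by
  cases ws with
  | nil => simp [pvNW, pvMA]
  | cons c t =>
    have hc : c ≠ ' ' := hws c (by simp)
    have ht : ∀ x ∈ t, x ≠ ' ' := fun x hx => hws x (by simp [hx])
    rw [List.foldl_cons]
    by_cases hv : c ∈ pvVowels
    · have hstep : pvStepA (r, as, [], [], l0) c = (r, as, [c], ['m', 'a'], some c) := by
        simp [pvStepA, hc, hv]
      rw [hstep, pv_run_tail t r as [c] ['m', 'a'] (some c) (by simp) ht, pv_optlast]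
      simp [pvNW, pvMA, hv]
    · have hstep : pvStepA (r, as, [], [], l0) c = (r, as, [], [c, 'm', 'a'], some c) := by
        simp [pvStepA, hc, hv]
      rw [hstep, pv_run_tail t r as [] [c, 'm', 'a'] (some c) (by simp) ht, pv_optlast]
      simp [pvNW, pvMA, hv]

lemma pv_nw_ma (w : List Char) (as : List Char) :
    pvNW w ++ (pvMA w ++ as) = pvGoatCore w as := by
  cases w with
  | nil => rfl
  | cons c t => by_cases hv : c ∈ pvVowels <;> simp [pvNW, pvMA, pvGoatCore, hv]

lemma pv_intercalate_cons₂ (s a b : List Char) (t : List (List Char)) :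
    List.intercalate s (a :: b :: t) = a ++ s ++ List.intercalate s (b :: t) := by
  simp [List.intercalate]

-- the whole loop over words joined by single spaces
lemma pv_run_words (wl : List (List Char)) (r as : List Char) (l0 : Option Char)
    (hnil : wl ≠ []) (hfree : ∀ w ∈ wl, ∀ c ∈ w, c ≠ ' ')
    (hlast : wl.getLast? ≠ some []) :
    pvFinalize (List.foldl pvStepA (r, as, [], [], l0) (List.intercalate [' '] wl))
      = r ++ List.intercalate [' '] (pvPieces as wl) := by
  induction wl generalizing r as l0 with
  | nil => exact absurd rfl hnil
  | cons w t ih =>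
    cases t with
    | nil =>
      have hw : w ≠ [] := by simpa using hlast
      have hfw : ∀ c ∈ w, c ≠ ' ' := hfree w (by simp)
      have hsing : ∀ v : List Char, List.intercalate [' '] [v] = v := by
        intro v; simp [List.intercalate]
      rw [hsing, pv_run_word w r as l0 hfw]
      have hlw : w.getLast? = some (w.getLast hw) := List.getLast?_eq_some_getLast hw
      have hne : w.getLast?.or l0 ≠ some ' ' := by
        rw [hlw]
        intro h
        exact hfw _ (List.getLast_mem hw) (by simpa using h)
      simp only [pvFinalize, hne, if_pos, ne_eq, not_false_iff]
      rw [pvPieces, pvPieces, hsing]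
      simp only [List.append_assoc]
      rw [pv_nw_ma]
    | cons w' t' =>
      have hfw : ∀ c ∈ w, c ≠ ' ' := hfree w (by simp)
      rw [pv_intercalate_cons₂, List.foldl_append, List.foldl_append,
        pv_run_word w r as l0 hfw, List.foldl_cons, List.foldl_nil]
      have hstep : pvStepA (r, as, pvNW w, pvMA w, w.getLast?.or l0) ' '
          = (r ++ pvNW w ++ (pvMA w ++ as) ++ [' '], as ++ ['a'], [], [], some ' ') := by
        simp [pvStepA]
      rw [hstep,
        ih (r ++ pvNW w ++ (pvMA w ++ as) ++ [' ']) (as ++ ['a']) (some ' ')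
          (by simp)
          (fun v hv => hfree v (by simp [hv]))
          (by rwa [List.getLast?_cons_cons] at hlast)]
      simp only [pvPieces]
      rw [pv_intercalate_cons₂, ← pv_nw_ma w as]
      simp [List.append_assoc]

-- chunks of splitOn ' ' are space-free
lemma pv_splitOnP_free (l : List Char) :
    ∀ w ∈ List.splitOnP (fun x => x == ' ') l, ∀ c ∈ w, c ≠ ' ' := by
  induction l with
  | nil =>
    intro w hw
    rw [List.splitOnP_nil] at hw
    simp at hw
    simp [hw]
  | cons c t ih =>
    intro w hw
    rw [List.splitOnP_cons] at hw
    by_cases hc : c = ' '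
    · simp [hc] at hw
      rcases hw with h | h
      · simp [h]
      · exact ih w h
    · simp [hc] at hw
      rcases h0 : List.splitOnP (fun x => x == ' ') t with _ | ⟨v, vs⟩
      · exact absurd h0 (List.splitOnP_ne_nil _ t)
      · rw [h0] at hw
        simp [List.modifyHead] at hw
        rcases hw with h | h
        · intro d hd
          rw [h] at hd
          rcases List.mem_cons.mp hd with hd | hd
          · simpa [hd] using hc
          · exact ih v (by simp [h0]) d hd
        · exact ih w (by simp [h0, h])

lemma pv_splitOn_free (l : List Char) :
    ∀ w ∈ List.splitOn ' ' l, ∀ c ∈ w, c ≠ ' ' := by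
  simpa [List.splitOn] using pv_splitOnP_free l

lemma pv_splitOn_ne_nil (l : List Char) : List.splitOn ' ' l ≠ [] := by
  simp [List.splitOn]
  exact List.splitOnP_ne_nil _ l

-- ===== VERDICT (by name: the statement is the Claim_ definition above) =====
theorem convert_to_goat_latin_spec : Claim_equal_convert_to_goat_latin := by
  intro S _ hpre
  set wl := S.toList.splitOn ' ' with hwl
  have h1 : List.intercalate [' '] wl = S.toList := List.intercalate_splitOn S.toList ' '
  have h2 : wl ≠ [] := pv_splitOn_ne_nil S.toList
  have h3 : ∀ w ∈ wl, ∀ c ∈ w, c ≠ ' ' := pv_splitOn_free S.toList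
  have h4 : wl.getLast? ≠ some [] := by
    intro hc
    exact hpre (List.mem_of_getLast? hc)
  have hA : convert_to_goat_latin S
      = String.ofList (pvFinalize (List.foldl pvStepA ([], ['a'], [], [], none) S.toList)) := rfl
  have hB : convert_to_goat_latin_alt S
      = String.ofList (List.intercalate [' '] (pvPieces ['a'] wl)) := by
    unfold convert_to_goat_latin_alt
    rw [pv_pieces_eq (S.toList.splitOn ' ') 0 hpre]
    rfl
  show convert_to_goat_latin S = convert_to_goat_latin_alt S
  rw [hA, hB]
  conv_lhs => rw [← h1]
  exact congrArg String.ofList (by simpa using pv_run_words wl [] ['a'] none h2 h3 h4)
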